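-- pv_equiv track=rewrite | github.com/KoslickiLab/dnds-using-fmh | src_jzr/dNdS/findORFs.py | listORFs
-- ===== SOURCE A (Python) =====
-- def listORFs(cds):
--     """Function reports a list of ORFs found in a reading frame"""
--     stop_codons = ['TAA', 'TAG', 'TGA']
--     ORFs = []
--     tempORFs = []
--     for codon in cds:
--         if codon == 'ATG':
--             tempORFs.append(codon)
--         elif codon in stop_codons:
--             if tempORFs:
--                 ORFs.append(tempORFs)
--             tempORFs = []
--         elif codon != 'ATG' and codon not in stop_codons and len(codon) == 3:
--             if len(codon) == 3:
--                 if tempORFs: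
--                     tempORFs.append(codon)
--             else:
--                 tempORFs = []
--     return(ORFs)
-- ===== SOURCE B (Python) =====
-- def listORFs(cds):
--     """Split cds into runs separated by stop codons, then map each
--     stop-terminated run to the ORF starting at its first ATG."""
--     stops = ('TAA', 'TAG', 'TGA')
--     closed_runs = []
--     run = []
--     for codon in cds:
--         if codon in stops:
--             closed_runs.append(run)
--             run = []
--         else:
--             run.append(codon)
--     # the trailing `run` was never closed by a stop codon: dropped
--     orfs = []
--     for r in closed_runs:
--         while r and r[0] != 'ATG':
--             r = r[1:]
--         if r:
--             orfs.append([c for c in r if len(c) == 3])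
--     return orfs
-- ===== Notes on version B (the rewrite author's own statement) =====
-- stated objective: alternative
-- what changed: Replaces A's single-pass accumulator state machine with a two-phase decomposition: first split cds into stop-codon-terminated runs (dropping the unterminated tail), then map each run to the length-3-filtered suffix starting at its first ATG.
import Mathlib
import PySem

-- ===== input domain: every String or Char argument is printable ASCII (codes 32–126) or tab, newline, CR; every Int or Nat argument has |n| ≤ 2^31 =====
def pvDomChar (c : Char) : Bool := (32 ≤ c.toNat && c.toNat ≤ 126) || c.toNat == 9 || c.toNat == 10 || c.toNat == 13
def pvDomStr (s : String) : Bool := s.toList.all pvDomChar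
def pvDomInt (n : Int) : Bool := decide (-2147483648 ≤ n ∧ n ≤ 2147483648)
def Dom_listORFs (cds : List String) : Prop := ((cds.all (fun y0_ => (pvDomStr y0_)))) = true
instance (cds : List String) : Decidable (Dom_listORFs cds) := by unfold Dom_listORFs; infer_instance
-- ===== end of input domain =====

-- B replaces A's flat accumulator state machine by a split-into-stop-terminated-runs pass
-- followed by a per-run first-ATG extraction (objective: alternative decomposition, same cost).

-- ===== PORT A =====
-- literal transliteration of Source A's single accumulator loop (state = (ORFs, tempORFs))
def listORFs (cds : List String) : List (List String) :=
  let stop_codons : List String := ["TAA", "TAG", "TGA"]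
  (cds.foldl (fun (st : List (List String) × List String) codon =>
    if codon == "ATG" then (st.1, st.2 ++ [codon])
    else if stop_codons.contains codon then
      ((if st.2.isEmpty then st.1 else st.1 ++ [st.2]), ([] : List String))
    else if codon != "ATG" && !(stop_codons.contains codon) && (PySem.Str.len codon == 3) then
      (if PySem.Str.len codon == 3 then
        (st.1, if st.2.isEmpty then st.2 else st.2 ++ [codon])
      else (st.1, ([] : List String)))
    else st) (([] : List (List String)), ([] : List String))).1

-- ===== PORT B =====
-- transliteration of Source B: first fold splits cds into stop-closed runs (dropping the
-- trailing unterminated run), second fold maps each run to its first-ATG suffix;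
-- the Python `while r and r[0] != 'ATG': r = r[1:]` is List.dropWhile (exact, step for step)
def listORFs_alt (cds : List String) : List (List String) :=
  let stops : List String := ["TAA", "TAG", "TGA"]
  let p := cds.foldl (fun (p : List (List String) × List String) codon =>
    if stops.contains codon then (p.1 ++ [p.2], ([] : List String))
    else (p.1, p.2 ++ [codon])) (([] : List (List String)), ([] : List String))
  p.1.foldl (fun orfs r =>
    let r' := r.dropWhile (fun c => c != "ATG")
    if r'.isEmpty then orfs
    else orfs ++ [r'.filter (fun c => PySem.Str.len c == 3)]) ([] : List (List String))

-- ===== PRECONDITION & SPEC =====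
def Spec_listORFs (cds : List String) (out : List (List String)) : Prop := out = listORFs_alt cds
instance (cds : List String) (out : List (List String)) : Decidable (Spec_listORFs cds out) := by unfold Spec_listORFs; infer_instance

-- ===== CLAIM (what is proved, stated in full; the proofs are below) =====
def Claim_equal_listORFs : Prop := ∀ (cds : List String), Dom_listORFs cds → Spec_listORFs cds (listORFs cds)

-- ===== LEMMAS AND PROOFS =====

-- A's step function (definitionally the lambda inside listORFs)
def aStep (st : List (List String) × List String) (codon : String) : List (List String) × List String :=
  if codon == "ATG" then (st.1, st.2 ++ [codon])
  else if (["TAA", "TAG", "TGA"] : List String).contains codon then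
    ((if st.2.isEmpty then st.1 else st.1 ++ [st.2]), ([] : List String))
  else if codon != "ATG" && !((["TAA", "TAG", "TGA"] : List String).contains codon) && (PySem.Str.len codon == 3) then
    (if PySem.Str.len codon == 3 then
      (st.1, if st.2.isEmpty then st.2 else st.2 ++ [codon])
    else (st.1, ([] : List String)))
  else st

-- B's splitting step (definitionally the lambda of B's first fold)
def bStep (p : List (List String) × List String) (codon : String) : List (List String) × List String :=
  if (["TAA", "TAG", "TGA"] : List String).contains codon then (p.1 ++ [p.2], ([] : List String))
  else (p.1, p.2 ++ [codon])

-- B's second fold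
def emit (rs : List (List String)) : List (List String) :=
  rs.foldl (fun orfs r =>
    let r' := r.dropWhile (fun c => c != "ATG")
    if r'.isEmpty then orfs
    else orfs ++ [r'.filter (fun c => PySem.Str.len c == 3)]) ([] : List (List String))

-- what A's tempORFs accumulator is in terms of B's current run
def g (run : List String) : List String :=
  (run.dropWhile (fun c => c != "ATG")).filter (fun c => PySem.Str.len c == 3)

lemma emit_append_one (rs : List (List String)) (r : List String) :
    emit (rs ++ [r]) = emit rs ++
      (if ((r.dropWhile (fun c => c != "ATG")).isEmpty) then []
       else [(r.dropWhile (fun c => c != "ATG")).filter (fun c => PySem.Str.len c == 3)]) := by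
  unfold emit
  rw [List.foldl_append]
  simp only [List.foldl_cons, List.foldl_nil]
  split_ifs with h
  · simp
  · rfl

-- A's tempORFs is empty exactly when the run has no "ATG" (head of a nonempty dropWhile is "ATG", length 3)
lemma g_empty_iff (run : List String) :
    (g run).isEmpty = (run.dropWhile (fun c => c != "ATG")).isEmpty := by
  induction run with
  | nil => rfl
  | cons x xs ih =>
    by_cases hx : x = "ATG"
    · subst hx
      unfold g
      rw [List.dropWhile_cons]
      have h1 : ((("ATG" : String) != "ATG")) = false := by decide
      have h2 : ((PySem.Str.len ("ATG" : String) == 3)) = true := by decide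
      simp only [h1, Bool.false_eq_true, if_false, List.filter_cons, h2, if_true]
      rfl
    · have hpx : (x != "ATG") = true := by simp [hx]
      unfold g at ih ⊢
      rw [List.dropWhile_cons, if_pos hpx]
      exact ih

lemma g_app_atg (run : List String) : g (run ++ ["ATG"]) = g run ++ ["ATG"] := by
  unfold g
  rw [List.dropWhile_append]
  by_cases h : (run.dropWhile (fun c => c != "ATG")).isEmpty
  · rw [if_pos h]
    rw [List.isEmpty_iff] at h
    rw [h]
    decide
  · rw [if_neg h, List.filter_append]
    congr 1

-- appending a non-ATG length-3 codon extends the tempORFs only when it is nonempty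
lemma g_app_len3 (run : List String) (c : String) (hne : ¬ c = "ATG")
    (hlen : PySem.Str.len c = 3) :
    g (run ++ [c]) = if (g run).isEmpty then g run else g run ++ [c] := by
  have hpc : (c != "ATG") = true := by simp [hne]
  have hfc : (PySem.Str.len c == 3) = true := by simpa using hlen
  rw [g_empty_iff]
  unfold g
  rw [List.dropWhile_append]
  by_cases h : (run.dropWhile (fun x => x != "ATG")).isEmpty
  · rw [if_pos h, if_pos h]
    rw [List.isEmpty_iff] at h
    rw [h]
    simp [hpc]
  · rw [if_neg h, if_neg h, List.filter_append]
    congr 1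
    simp only [List.filter_cons, hfc, if_true, List.filter_nil]

-- a codon of length ≠ 3 never changes A's tempORFs and is filtered out of B's run
lemma g_app_short (run : List String) (c : String) (hlen : ¬ PySem.Str.len c = 3) :
    g (run ++ [c]) = g run := by
  have hne : ¬ c = "ATG" := by rintro rfl; exact hlen (by decide)
  have hpc : (c != "ATG") = true := by simp [hne]
  have hfc : (PySem.Str.len c == 3) = false := by simpa using hlen
  unfold g
  rw [List.dropWhile_append]
  by_cases h : (run.dropWhile (fun x => x != "ATG")).isEmpty
  · rw [if_pos h]
    rw [List.isEmpty_iff] at h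
    rw [h]
    simp [hpc]
  · rw [if_neg h, List.filter_append]
    simp only [List.filter_cons, hfc, Bool.false_eq_true, if_false, List.filter_nil,
      List.append_nil]

-- loop invariant: A's state is (emit closed, g run) whenever B's splitter state is (closed, run)
lemma key (cds : List String) : ∀ (closed : List (List String)) (run : List String),
    (cds.foldl aStep (emit closed, g run)).1 =
      emit ((cds.foldl bStep (closed, run)).1) := by
  induction cds with
  | nil => intro closed run; rfl
  | cons c cs ih =>
    intro closed run
    simp only [List.foldl_cons]
    by_cases hatg : c = "ATG"
    · subst hatg
      have ha : aStep (emit closed, g run) "ATG" = (emit closed, g (run ++ ["ATG"])) := by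
        unfold aStep
        rw [if_pos (by decide : ((("ATG" : String) == "ATG")) = true)]
        rw [g_app_atg]
      have hb : bStep (closed, run) "ATG" = (closed, run ++ ["ATG"]) := by
        unfold bStep
        rw [if_neg (by decide : ¬ ((["TAA", "TAG", "TGA"] : List String).contains "ATG" = true))]
      rw [ha, hb]; exact ih closed (run ++ ["ATG"])
    · have hc1 : (c == "ATG") = false := by simp [hatg]
      by_cases hstop : (["TAA", "TAG", "TGA"] : List String).contains c = true
      · have ha : aStep (emit closed, g run) c = (emit (closed ++ [run]), g []) := by
          unfold aStep
          simp only [hc1, Bool.false_eq_true, if_false, hstop, if_true]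
          rw [emit_append_one]
          by_cases h : (run.dropWhile (fun x => x != "ATG")).isEmpty
          · have h2 : (g run).isEmpty = true := by rw [g_empty_iff]; exact h
            rw [if_pos h2, if_pos h]
            simp [g]
          · have h2 : ¬ (g run).isEmpty = true := by rw [g_empty_iff]; exact h
            rw [if_neg h2, if_neg h]
            simp [g]
        have hb : bStep (closed, run) c = (closed ++ [run], []) := by
          unfold bStep
          rw [if_pos hstop]
        rw [ha, hb]; exact ih (closed ++ [run]) []
      · have hc2 : (c != "ATG") = true := by simp [hatg]
        have hb : bStep (closed, run) c = (closed, run ++ [c]) := by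
          unfold bStep
          rw [if_neg hstop]
        by_cases hlen : PySem.Str.len c = 3
        · have hfc : (PySem.Str.len c == 3) = true := by simpa using hlen
          have ha : aStep (emit closed, g run) c = (emit closed, g (run ++ [c])) := by
            unfold aStep
            simp only [hc1, Bool.false_eq_true, if_false, hstop, hc2, hfc,
              Bool.not_false, Bool.and_self, if_true]
            rw [g_app_len3 run c hatg hlen]
          rw [ha, hb]; exact ih closed (run ++ [c])
        · have hfc : (PySem.Str.len c == 3) = false := by simpa using hlen
          have ha : aStep (emit closed, g run) c = (emit closed, g (run ++ [c])) := by
            unfold aStep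
            simp only [hc1, Bool.false_eq_true, if_false, hstop, hc2, hfc,
              Bool.not_false, Bool.true_and, Bool.and_false, if_false]
            rw [g_app_short run c hlen]
          rw [ha, hb]; exact ih closed (run ++ [c])

-- ===== VERDICT (by name: the statement is the Claim_ definition above) =====
theorem listORFs_spec : Claim_equal_listORFs := by
  intro cds _
  show listORFs cds = listORFs_alt cds
  exact key cds [] []
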